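-- pv_equiv track=rewrite | github.com/pypi-data/pypi-mirror-398 | packages/textnotes/textnotes-0.1.0.tar.gz/textnotes-0.1.0/textnotes/utils.py | group_topics
-- ===== SOURCE A (Python) =====
-- from collections import defaultdict
--
-- def group_topics(sentences):
--     """Group sentences by first keyword."""
--     groups = defaultdict(list)
--
--     for s in sentences:
--         words = s.split()
--         if not words:
--             continue
--         key = words[0].lower()
--         groups[key].append(s)
--
--     return dict(groups)
-- ===== SOURCE B (Python) =====
-- def group_topics(sentences):
--     """Group sentences by first keyword."""
--     keyed = [(s.split()[0].lower(), s) for s in sentences if s.split()]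
--     result = {}
--     for k, _ in keyed:
--         if k not in result:
--             result[k] = [t for kk, t in keyed if kk == k]
--     return result
-- ===== Notes on version B (the rewrite author's own statement) =====
-- stated objective: alternative
-- what changed: B precomputes a (key, sentence) pair list once, then builds the dict by taking each key at its first occurrence and collecting its whole group with a single filter pass, instead of A's incremental defaultdict-append loop.
import Mathlib
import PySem

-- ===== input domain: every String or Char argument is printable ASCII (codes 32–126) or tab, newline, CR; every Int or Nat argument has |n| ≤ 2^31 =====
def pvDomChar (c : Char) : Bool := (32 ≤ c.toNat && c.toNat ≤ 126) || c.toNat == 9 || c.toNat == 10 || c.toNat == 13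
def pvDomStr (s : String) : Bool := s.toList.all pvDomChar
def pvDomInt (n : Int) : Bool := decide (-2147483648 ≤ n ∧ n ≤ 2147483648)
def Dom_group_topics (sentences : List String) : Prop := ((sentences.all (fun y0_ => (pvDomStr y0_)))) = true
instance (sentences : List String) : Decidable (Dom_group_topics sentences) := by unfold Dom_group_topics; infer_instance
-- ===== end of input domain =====

-- B groups by first-occurrence key with one collecting filter per distinct key, instead of A's
-- incremental defaultdict-append loop; objective: alternative (same results, different structure).

-- ===== PORT A =====
-- defaultdict(list) 'groups[key].append(s)': exact Python dict semantics ported by hand —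
-- overwrite the (unique) existing binding in place, append a new key at the end.
def pyDictAppend (g : List (String × List String)) (k : String) (s : String) :
    List (String × List String) :=
  match g with
  | [] => [(k, [s])]
  | (k', v) :: t => if k' = k then (k', v ++ [s]) :: t else (k', v) :: pyDictAppend t k s

def group_topics (sentences : List String) : List (String × List String) :=
  sentences.foldl (fun groups s =>
    if PySem.Str.split₀ s = [] then groups
    else pyDictAppend groups (PySem.Str.lower ((PySem.Str.split₀ s).headD "")) s) []

-- ===== PORT B =====
def group_topics_alt (sentences : List String) : List (String × List String) :=
  let keyed := (sentences.filter (fun s => !(PySem.Str.split₀ s).isEmpty)).map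
      (fun s => (PySem.Str.lower ((PySem.Str.split₀ s).headD ""), s))
  keyed.foldl (fun result p =>
    if (result.map Prod.fst).contains p.1 then result
    else result ++ [(p.1, keyed.filterMap (fun q => if q.1 = p.1 then some q.2 else none))]) []

-- ===== PRECONDITION & SPEC =====
def Spec_group_topics (sentences : List String) (out : List (String × List String)) : Prop := out = group_topics_alt sentences
instance (sentences : List String) (out : List (String × List String)) : Decidable (Spec_group_topics sentences out) := by unfold Spec_group_topics; infer_instance

-- ===== CLAIM (what is proved, stated in full; the proofs are below) =====
def Claim_equal_group_topics : Prop := ∀ (sentences : List String), Dom_group_topics sentences → Spec_group_topics sentences (group_topics sentences)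

-- ===== LEMMAS AND PROOFS =====

def keyOf? (s : String) : Option String :=
  if PySem.Str.split₀ s = [] then none
  else some (PySem.Str.lower ((PySem.Str.split₀ s).headD ""))

def keyedOf (xs : List String) : List (String × String) :=
  xs.filterMap (fun s => (keyOf? s).map (fun k => (k, s)))

def collect (full : List (String × String)) (k : String) : List String :=
  full.filterMap (fun q => if q.1 = k then some q.2 else none)

def keyFold (l : List (String × String)) (ks : List String) : List String :=
  l.foldl (fun a p => if a.contains p.1 then a else a ++ [p.1]) ks

lemma keyed_eq (xs : List String) :
    (xs.filter (fun s => !(PySem.Str.split₀ s).isEmpty)).map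
      (fun s => (PySem.Str.lower ((PySem.Str.split₀ s).headD ""), s)) = keyedOf xs := by
  induction xs with
  | nil => rfl
  | cons x t ih =>
    by_cases h : PySem.Str.split₀ x = [] <;>
      simp [keyedOf, keyOf?, h] at * <;>
      simpa [keyedOf] using ih

lemma mem_keyFold (l : List (String × String)) (ks : List String) (x : String) :
    x ∈ keyFold l ks ↔ x ∈ ks ∨ x ∈ l.map Prod.fst := by
  induction l generalizing ks with
  | nil => simp [keyFold]
  | cons p t ih =>
    simp only [keyFold, List.foldl_cons] at ih ⊢
    by_cases h : ks.contains p.1 = true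
    · rw [if_pos h, ih]
      simp only [List.contains_eq_mem, decide_eq_true_eq] at h
      simp only [List.map_cons, List.mem_cons]
      constructor
      · rintro (hk | hk)
        · exact Or.inl hk
        · exact Or.inr (Or.inr hk)
      · rintro (hk | hk | hk)
        · exact Or.inl hk
        · exact Or.inl (hk ▸ h)
        · exact Or.inr hk
    · rw [if_neg h, ih]
      simp only [List.mem_append, List.map_cons, List.mem_cons]
      tauto

lemma nodup_keyFold (l : List (String × String)) (ks : List String) (h : ks.Nodup) :
    (keyFold l ks).Nodup := by
  induction l generalizing ks with
  | nil => exact h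
  | cons p t ih =>
    simp only [keyFold, List.foldl_cons] at ih ⊢
    by_cases hc : ks.contains p.1 = true
    · rw [if_pos hc]; exact ih ks h
    · rw [if_neg hc]
      apply ih
      simp only [List.contains_eq_mem, decide_eq_true_eq] at hc
      rw [List.nodup_append]
      refine ⟨h, List.nodup_singleton _, ?_⟩
      simpa using fun a ha (he : a = p.1) => hc (he ▸ ha)

lemma bfold (l full : List (String × String)) (ks : List String) :
    l.foldl (fun result p =>
      if (result.map Prod.fst).contains p.1 then result
      else result ++ [(p.1, collect full p.1)])
      (ks.map (fun k => (k, collect full k))) =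
    (keyFold l ks).map (fun k => (k, collect full k)) := by
  induction l generalizing ks with
  | nil => rfl
  | cons p t ih =>
    have hfst : (ks.map (fun k => (k, collect full k))).map Prod.fst = ks := by
      rw [List.map_map]; simp [Function.comp_def]
    simp only [List.foldl_cons, hfst, keyFold] at ih ⊢
    by_cases h : ks.contains p.1 = true
    · rw [if_pos h, if_pos h]; exact ih ks
    · rw [if_neg h, if_neg h]
      rw [show (ks.map (fun k => (k, collect full k))) ++ [(p.1, collect full p.1)]
            = (ks ++ [p.1]).map (fun k => (k, collect full k)) by simp]
      exact ih (ks ++ [p.1])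

lemma collect_append (full : List (String × String)) (k s k' : String) :
    collect (full ++ [(k, s)]) k' = collect full k' ++ (if k' = k then [s] else []) := by
  by_cases h : k' = k <;> simp [collect, List.filterMap_append, h, eq_comm]

lemma collect_nil_of_not_mem (full : List (String × String)) (k : String)
    (h : k ∉ full.map Prod.fst) : collect full k = [] := by
  induction full with
  | nil => rfl
  | cons q t ih =>
    simp only [List.map_cons, List.mem_cons, not_or] at h
    have h1 : ¬ q.1 = k := fun he => h.1 he.symm
    simp only [collect, List.filterMap_cons, if_neg h1]
    exact ih h.2

lemma pda_not_mem (ks : List String) (c : String → List String) (k s : String) (h : k ∉ ks) :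
    pyDictAppend (ks.map (fun k' => (k', c k'))) k s
      = ks.map (fun k' => (k', c k')) ++ [(k, [s])] := by
  induction ks with
  | nil => rfl
  | cons k0 t ih =>
    simp only [List.mem_cons, not_or] at h
    have hne : ¬ k0 = k := fun he => h.1 he.symm
    simp only [List.map_cons, pyDictAppend, if_neg hne, List.cons_append]
    rw [ih h.2]

lemma pda_mem (ks : List String) (c : String → List String) (k s : String)
    (h : k ∈ ks) (hn : ks.Nodup) :
    pyDictAppend (ks.map (fun k' => (k', c k'))) k s
      = ks.map (fun k' => (k', c k' ++ if k' = k then [s] else [])) := by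
  induction ks with
  | nil => simp at h
  | cons k0 t ih =>
    rcases List.nodup_cons.mp hn with ⟨hk0, hnt⟩
    by_cases he : k0 = k
    · subst he
      simp only [List.map_cons, pyDictAppend, if_true]
      congr 1
      exact List.map_congr_left fun x hx => by
        have hxk : ¬ x = k0 := fun hxx => hk0 (hxx ▸ hx)
        simp [hxk]
    · have hkt : k ∈ t := by
        rcases List.mem_cons.mp h with h' | h'
        · exact absurd h'.symm he
        · exact h'
      simp only [List.map_cons, pyDictAppend, if_neg he, ih hkt hnt]
      simp only [List.append_nil]

lemma keyedOf_append_singleton (xs : List String) (s : String) :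
    keyedOf (xs ++ [s]) = keyedOf xs ++ keyedOf [s] := by
  simp [keyedOf, List.filterMap_append]

lemma A_char (xs : List String) :
    group_topics xs
      = (keyFold (keyedOf xs) []).map (fun k => (k, collect (keyedOf xs) k)) := by
  induction xs using List.reverseRecOn with
  | nil => rfl
  | append_singleton xs s ih =>
    rw [group_topics, List.foldl_append]
    rw [group_topics] at ih
    simp only [List.foldl_cons, List.foldl_nil]
    by_cases h : PySem.Str.split₀ s = []
    · have hk : keyedOf (xs ++ [s]) = keyedOf xs := by
        simp [keyedOf, keyOf?, h]
      rw [if_pos h, hk]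
      exact ih
    · rw [if_neg h, ih]
      have hk1 : keyedOf [s] = [(PySem.Str.lower ((PySem.Str.split₀ s).headD ""), s)] := by
        simp [keyedOf, keyOf?, h]
      have hfull : keyedOf (xs ++ [s])
          = keyedOf xs ++ [(PySem.Str.lower ((PySem.Str.split₀ s).headD ""), s)] := by
        rw [keyedOf_append_singleton, hk1]
      rw [hfull]
      have hkf : ∀ (full : List (String × String)) (k s' : String),
          keyFold (full ++ [(k, s')]) [] =
            if (keyFold full []).contains k then keyFold full [] else keyFold full [] ++ [k] := by
        intro full k s'
        unfold keyFold
        rw [List.foldl_append]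
        rfl
      rw [hkf]
      set k := PySem.Str.lower ((PySem.Str.split₀ s).headD "") with hkdef
      set full := keyedOf xs with hf
      set ks := keyFold full [] with hks
      have hnd : ks.Nodup := nodup_keyFold full [] (by simp)
      by_cases hmem : k ∈ ks
      · rw [if_pos (by simpa using hmem)]
        rw [pda_mem ks (fun k' => collect full k') k s hmem hnd]
        exact List.map_congr_left fun x _ => by rw [collect_append]
      · rw [if_neg (by simpa using hmem)]
        rw [pda_not_mem ks (fun k' => collect full k') k s hmem, List.map_append]
        congr 1
        · refine List.map_congr_left fun x hx => ?_
          have hxk : ¬ x = k := fun hxx => hmem (hxx ▸ hx)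
          rw [collect_append]; simp [hxk]
        · have hnotin : k ∉ full.map Prod.fst := fun hcontra =>
            hmem ((mem_keyFold full [] k).mpr (Or.inr hcontra))
          simp [collect_append, collect_nil_of_not_mem full k hnotin]

lemma B_char (xs : List String) :
    group_topics_alt xs
      = (keyFold (keyedOf xs) []).map (fun k => (k, collect (keyedOf xs) k)) := by
  rw [group_topics_alt]
  simp only [keyed_eq]
  have hb := bfold (keyedOf xs) (keyedOf xs) []
  simpa [collect] using hb

-- ===== VERDICT (by name: the statement is the Claim_ definition above) =====
theorem group_topics_spec : Claim_equal_group_topics := by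
  intro xs _
  unfold Spec_group_topics
  rw [A_char, B_char]
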